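-- pv_equiv track=rewrite | github.com/rishaan-das-2011/Python-MiddleSchool | lost_in_translation/LostInTranslation.py | ubbi_dubbi
-- ===== SOURCE A (Python) =====
-- def ubbi_dubbi(base):
--
--     # Create a list of vowels: "a", "e", "i", "o", "u"
--     # and "y"
--
--     vowels = ["a", "e", "i", "o", "u", "y"]
--
--     # Create variable final_word as an empty string
--
--     final_word  = ""
--
--     # Create variable this_letter_vowel that starts as
--     # False
--
--     this_letter_vowel = False
--
--     # Create variable prev_letter_vowel that starts as
--     # False
--
--     prev_letter_vowel = False
--
--
--     # --- Go through letters --- #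
--
--     # For letter in base
--
--     for letter in base:
--
--         # --- Check if last letter was a vowel --- #
--
--         # Set prev_letter_vowel to this_letter_vowel
--
--         prev_letter_vowel = this_letter_vowel
--
--
--         # --- Check if this letter is a vowel --- #
--
--         # If letter is in vowels
--
--         if letter in vowels:
--
--
--             # Set this_letter_vowel to True
--
--             this_letter_vowel = True
--
--         # Else
--
--
--         else:
--
--             # Set this_letter_vowel to False
--
--             this_letter_vowel = False
--
--
--         # --- Add "ubb" in front of vowel sets --- #
--
--         # If not this_letter_vowel or prev_letter_vowel
--
--         if not this_letter_vowel or not prev_letter_vowel: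
--
--             # Increment final_word by letter
--
--             final_word += letter
--
--         # Else
--
--         else:
--
--             # Increment final_word by "ubb" + letter
--
--             final_word  += ("ubb" + letter)
--
--     # RETURN final_word
--     # ---> TEST AFTER THIS LINE <--- #
--
--     return final_word
-- ===== SOURCE B (Python) =====
-- VOWELS = set("aeiouy")
--
-- def ubbi_dubbi(base):
--     out = []
--     i, n = 0, len(base)
--     while i < n:
--         c = base[i]
--         i += 1
--         if c in VOWELS:
--             run = []
--             while i < n and base[i] in VOWELS:
--                 run.append(base[i])
--                 i += 1
--             out.append(c)
--             out.extend("ubb" + v for v in run)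
--         else:
--             out.append(c)
--     return "".join(out)
-- ===== Notes on version B (the rewrite author's own statement) =====
-- stated objective: alternative
-- what changed: B scans the string run-by-run (an inner loop collects each maximal vowel run and emits first-char + 'ubb'-prefixed rest), replacing A's per-character pass that maintains this/previous-letter boolean flags.
import Mathlib
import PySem

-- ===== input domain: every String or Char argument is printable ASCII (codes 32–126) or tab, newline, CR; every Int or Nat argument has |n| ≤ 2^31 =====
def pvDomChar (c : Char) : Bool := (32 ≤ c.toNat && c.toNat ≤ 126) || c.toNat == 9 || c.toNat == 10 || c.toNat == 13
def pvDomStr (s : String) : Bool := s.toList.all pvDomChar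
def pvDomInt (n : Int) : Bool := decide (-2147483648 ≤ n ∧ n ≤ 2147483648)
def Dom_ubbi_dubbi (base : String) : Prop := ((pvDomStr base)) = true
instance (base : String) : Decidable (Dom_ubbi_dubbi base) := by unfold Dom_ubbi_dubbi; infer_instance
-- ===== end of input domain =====

-- ===== PORT A =====
-- B changes the loop decomposition (run-based scan instead of per-letter vowel flags); behaviour is identical. Objective: alternative.
def pvVowels : List Char := ['a', 'e', 'i', 'o', 'u', 'y']

-- literal transliteration of A: one pass, state = (final_word, this_letter_vowel);
-- prev_letter_vowel is taken from the previous state at the top of each step.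
-- the loop body of A (one letter): prev := this; this := letter in vowels; append letter or "ubb"+letter
def pvStepA (st : List Char × Bool) (letter : Char) : List Char × Bool :=
  let prev_letter_vowel := st.2
  let this_letter_vowel := letter ∈ pvVowels
  if !this_letter_vowel || !prev_letter_vowel then
    (st.1 ++ [letter], this_letter_vowel)
  else
    (st.1 ++ ('u' :: 'b' :: 'b' :: [letter]), this_letter_vowel)

def ubbi_dubbi (base : String) : String :=
  String.ofList ((base.toList.foldl pvStepA ([], false)).1)

-- ===== PORT B =====
def pvIsVowel (c : Char) : Bool := c ∈ pvVowels

-- transliteration of Source B: outer loop per run; the inner while collecting the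
-- vowel run is takeWhile, the index advance past it is dropWhile.
def pvAltGo : List Char → List Char
  | [] => []
  | c :: rest =>
    if pvIsVowel c then
      let run := rest.takeWhile pvIsVowel
      (c :: run.flatMap (fun v => 'u' :: 'b' :: 'b' :: [v])) ++ pvAltGo (rest.dropWhile pvIsVowel)
    else
      c :: pvAltGo rest
termination_by l => l.length
decreasing_by
  · exact Nat.lt_succ_of_le (rest.length_dropWhile_le _)
  · simp

def ubbi_dubbi_alt (base : String) : String := String.ofList (pvAltGo base.toList)

-- ===== PRECONDITION & SPEC =====
def Spec_ubbi_dubbi (base : String) (out : String) : Prop := out = ubbi_dubbi_alt base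
instance (base : String) (out : String) : Decidable (Spec_ubbi_dubbi base out) := by unfold Spec_ubbi_dubbi; infer_instance

-- ===== CLAIM (what is proved, stated in full; the proofs are below) =====
def Claim_equal_ubbi_dubbi : Prop := ∀ (base : String), Dom_ubbi_dubbi base → Spec_ubbi_dubbi base (ubbi_dubbi base)

-- ===== LEMMAS AND PROOFS =====

-- recursive characterisation of A's fold body, parametrised by the previous-letter flag
def pvSpecA : List Char → Bool → List Char
  | [], _ => []
  | c :: rest, prev =>
    (if pvIsVowel c && prev then 'u' :: 'b' :: 'b' :: [c] else [c]) ++ pvSpecA rest (pvIsVowel c)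

theorem pvFoldA (l : List Char) : ∀ (st : List Char × Bool),
    (l.foldl pvStepA st).1 = st.1 ++ pvSpecA l st.2 := by
  induction l with
  | nil => intro st; simp [pvSpecA]
  | cons c rest ih =>
    intro st
    rw [List.foldl_cons, ih]
    by_cases hv : (c ∈ pvVowels) <;> cases hp : st.2 <;>
      simp [pvStepA, pvSpecA, pvIsVowel, hv, hp]

theorem pvSpecA_true (l : List Char) :
    pvSpecA l true
      = (l.takeWhile pvIsVowel).flatMap (fun v => 'u' :: 'b' :: 'b' :: [v])
        ++ pvSpecA (l.dropWhile pvIsVowel) false := by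
  induction l with
  | nil => simp [pvSpecA]
  | cons c rest ih =>
    by_cases hv : pvIsVowel c
    · simp [pvSpecA, hv, ih]
    · simp [pvSpecA, hv]

theorem pvSpecA_eq_altGo (l : List Char) : pvSpecA l false = pvAltGo l := by
  induction l using pvAltGo.induct with
  | case1 => simp [pvSpecA, pvAltGo]
  | case2 c rest hv ih =>
    simp only [pvIsVowel] at hv
    simp [pvAltGo, pvSpecA, pvIsVowel, hv, pvSpecA_true, ih]
  | case3 c rest hv ih =>
    rw [pvAltGo]
    simp only [pvIsVowel] at hv
    simp [pvSpecA, pvIsVowel, hv, ih]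

-- ===== VERDICT =====
theorem ubbi_dubbi_spec : Claim_equal_ubbi_dubbi := by
  intro base _
  unfold Spec_ubbi_dubbi ubbi_dubbi ubbi_dubbi_alt
  rw [pvFoldA, pvSpecA_eq_altGo]
  simp
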